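-- pv_equiv track=rewrite | github.com/Donna632/CPU-Scheduler | scheduler_gui.py | fcfs_scheduling
-- ===== SOURCE A (Python) =====
-- def fcfs_scheduling(processes):
--     processes.sort(key=lambda x: x[1])  # Sort by Arrival Time
--     completion_time, turnaround_time, waiting_time, gantt_chart = [], [], [], []
--     time = 0
--
--     for pid, arrival, burst, _ in processes:
--         start_time = max(time, arrival)
--         end_time = start_time + burst
--         time = end_time
--
--         completion_time.append(end_time)
--         turnaround_time.append(end_time - arrival)
--         waiting_time.append(turnaround_time[-1] - burst)
--         gantt_chart.append((pid, start_time, burst))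
--
--     return completion_time, turnaround_time, waiting_time, gantt_chart
-- ===== SOURCE B (Python) =====
-- def fcfs_scheduling(processes):
--     processes.sort(key=lambda x: x[1])  # sort by arrival time, in place (same mutation as A)
--     n = len(processes)
--     # Closed-form FCFS: completion[i] = S[i] + M[i], where S[i] is the prefix sum of
--     # bursts and M[i] = max(0, max_{j<=i} (arrival[j] - S[j-1])) is the accumulated idle
--     # offset.  No simulated clock / max(end, arrival) reducer is needed.
--     S = []
--     s = 0
--     for _, _, burst, _ in processes:
--         s += burst
--         S.append(s)
--     M = []
--     m = 0
--     for i in range(n):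
--         _, arrival, burst, _ = processes[i]
--         m = max(m, arrival - (S[i] - burst))
--         M.append(m)
--     completion_time = [S[i] + M[i] for i in range(n)]
--     turnaround_time = [completion_time[i] - processes[i][1] for i in range(n)]
--     waiting_time = [turnaround_time[i] - processes[i][2] for i in range(n)]
--     gantt_chart = [(processes[i][0], completion_time[i] - processes[i][2], processes[i][2])
--                    for i in range(n)]
--     return completion_time, turnaround_time, waiting_time, gantt_chart
-- ===== Notes on version B (the rewrite author's own statement) =====
-- stated objective: alternative
-- what changed: B replaces A's simulated clock (running end time with max(time, arrival) per step) by a closed-form computation: prefix sums S of the bursts plus a running max M of the idle offsets arrival[j] - S[j-1], with completion[i] = S[i] + M[i]; the output lists are then derived by index passes, and the in-place sort by arrival is kept.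
import Mathlib
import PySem

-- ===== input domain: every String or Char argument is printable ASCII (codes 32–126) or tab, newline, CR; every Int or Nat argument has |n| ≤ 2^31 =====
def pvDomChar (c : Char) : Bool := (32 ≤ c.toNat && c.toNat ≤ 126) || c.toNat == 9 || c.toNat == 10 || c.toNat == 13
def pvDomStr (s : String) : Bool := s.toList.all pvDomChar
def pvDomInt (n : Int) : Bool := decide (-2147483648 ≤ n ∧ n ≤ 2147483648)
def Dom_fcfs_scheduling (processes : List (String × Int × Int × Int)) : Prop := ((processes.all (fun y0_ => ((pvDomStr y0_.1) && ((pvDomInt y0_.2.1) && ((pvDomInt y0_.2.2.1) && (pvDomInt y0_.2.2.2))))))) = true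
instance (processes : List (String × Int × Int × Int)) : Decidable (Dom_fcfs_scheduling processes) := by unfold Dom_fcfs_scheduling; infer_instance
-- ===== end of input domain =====

-- B replaces A's simulated clock by a closed form (prefix burst sums + running max of
-- idle offsets); same cost. Equivalence is about the RETURN value; both Pythons mutate
-- `processes` identically (in-place sort by arrival).

-- ===== PORT A =====
-- A's loop state: (completion_time, turnaround_time, waiting_time, gantt_chart, time)
def fcfsStepA (acc : List Int × List Int × List Int × List (String × Int × Int) × Int)
    (p : String × Int × Int × Int) :
    List Int × List Int × List Int × List (String × Int × Int) × Int :=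
  let start_time := max acc.2.2.2.2 p.2.1
  let end_time := start_time + p.2.2.1
  (acc.1 ++ [end_time],
   acc.2.1 ++ [end_time - p.2.1],
   acc.2.2.1 ++ [(end_time - p.2.1) - p.2.2.1],  -- turnaround_time[-1] - burst: the value just appended
   acc.2.2.2.1 ++ [(p.1, start_time, p.2.2.1)],
   end_time)

def fcfs_scheduling (processes : List (String × Int × Int × Int)) : List Int × List Int × List Int × (List (String × Int × Int)) :=
  let ps := PySem.List.sorted processes (fun x => x.2.1) false
  let st := ps.foldl fcfsStepA ([], [], [], [], 0)
  (st.1, st.2.1, st.2.2.1, st.2.2.2.1)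

-- ===== PORT B =====
-- prefix sums of the bursts: s += burst; S.append(s)
def fcfsPrefix (s : Int) : List (String × Int × Int × Int) → List Int
  | [] => []
  | p :: rest => (s + p.2.2.1) :: fcfsPrefix (s + p.2.2.1) rest

-- running max of the idle offsets: m = max(m, arrival - (S[i] - burst)); M.append(m)
-- (the index loop over processes and S is transcribed as recursion over their zip)
def fcfsRunMax (m : Int) : List ((String × Int × Int × Int) × Int) → List Int
  | [] => []
  | (p, si) :: rest =>
    let m' := max m (p.2.1 - (si - p.2.2.1))
    m' :: fcfsRunMax m' rest

def fcfs_scheduling_alt (processes : List (String × Int × Int × Int)) : List Int × List Int × List Int × (List (String × Int × Int)) :=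
  let ps := PySem.List.sorted processes (fun x => x.2.1) false
  let S := fcfsPrefix 0 ps
  let M := fcfsRunMax 0 (ps.zip S)
  let completion := (S.zip M).map (fun sm => sm.1 + sm.2)
  (completion,
   (completion.zip ps).map (fun cp => cp.1 - cp.2.2.1),
   (completion.zip ps).map (fun cp => (cp.1 - cp.2.2.1) - cp.2.2.2.1),
   (completion.zip ps).map (fun cp => (cp.2.1, cp.1 - cp.2.2.2.1, cp.2.2.2.1)))

-- ===== PRECONDITION & SPEC =====
def Spec_fcfs_scheduling (processes : List (String × Int × Int × Int)) (out : List Int × List Int × List Int × (List (String × Int × Int))) : Prop := out = fcfs_scheduling_alt processes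
instance (processes : List (String × Int × Int × Int)) (out : List Int × List Int × List Int × (List (String × Int × Int))) : Decidable (Spec_fcfs_scheduling processes out) := by unfold Spec_fcfs_scheduling; infer_instance

-- ===== CLAIM (what is proved, stated in full; the proofs are below) =====
def Claim_equal_fcfs_scheduling : Prop := ∀ (processes : List (String × Int × Int × Int)), Dom_fcfs_scheduling processes → Spec_fcfs_scheduling processes (fcfs_scheduling processes)

-- ===== LEMMAS AND PROOFS =====

-- A's completion-time recurrence, extracted: end' = max(time, arrival) + burst.
def fcfsEnds (t : Int) : List (String × Int × Int × Int) → List Int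
  | [] => []
  | p :: rest =>
    let t' := max t p.2.1 + p.2.2.1
    t' :: fcfsEnds t' rest

-- A's fold, started from any accumulator, appends the lists derived from fcfsEnds.
theorem fcfs_loop (ps : List (String × Int × Int × Int)) (c t w : List Int)
    (g : List (String × Int × Int)) (time : Int) :
    ps.foldl fcfsStepA (c, t, w, g, time) =
      (c ++ fcfsEnds time ps,
       t ++ ((fcfsEnds time ps).zip ps).map (fun ep => ep.1 - ep.2.2.1),
       w ++ ((fcfsEnds time ps).zip ps).map (fun ep => (ep.1 - ep.2.2.1) - ep.2.2.2.1),
       g ++ ((fcfsEnds time ps).zip ps).map (fun ep => (ep.2.1, ep.1 - ep.2.2.2.1, ep.2.2.2.1)),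
       ps.foldl (fun a p => max a p.2.1 + p.2.2.1) time) := by
  induction ps generalizing c t w g time with
  | nil => simp [fcfsEnds]
  | cons p rest ih =>
    simp only [List.foldl_cons, fcfsEnds, fcfsStepA, ih, List.zip_cons_cons, List.map_cons]
    simp

-- B's closed form reproduces the simulated recurrence: S[i] + M[i] = end[i]
-- (induction invariant: clock = s + m).
theorem fcfs_closed_form (ps : List (String × Int × Int × Int)) (s m : Int) :
    ((fcfsPrefix s ps).zip (fcfsRunMax m (ps.zip (fcfsPrefix s ps)))).map
        (fun sm => sm.1 + sm.2) = fcfsEnds (s + m) ps := by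
  induction ps generalizing s m with
  | nil => simp [fcfsPrefix, fcfsRunMax, fcfsEnds]
  | cons p rest ih =>
    simp only [fcfsPrefix, fcfsRunMax, fcfsEnds, List.zip_cons_cons, List.map_cons]
    rw [ih]
    have h : s + p.2.2.1 + max m (p.2.1 - (s + p.2.2.1 - p.2.2.1)) = max (s + m) p.2.1 + p.2.2.1 := by omega
    rw [h]

-- ===== VERDICT (by name: the statement is the Claim_ definition above) =====
theorem fcfs_scheduling_spec : Claim_equal_fcfs_scheduling := by
  intro processes _
  unfold Spec_fcfs_scheduling fcfs_scheduling fcfs_scheduling_alt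
  simp only [fcfs_closed_form, fcfs_loop]
  simp
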